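-- pv_equiv track=rewrite | github.com/ordenarion/wolfram-lang-code-plagiarism | wolframPreprocessing.py | add_missing_semicolumns
-- ===== SOURCE A (Python) =====
-- def add_missing_semicolumns(input_string):
--     stack = []
--     semicolumn_positions = []
--     for id, symb in enumerate(input_string):
--         if symb != ")":
--             stack.append(symb)
--         else:
--             searchQ = True
--             bracket_position = id
--             while len(stack) > 0 and stack[-1] != "(":
--                 current = stack.pop(-1)
--                 if searchQ:
--                     if current == "=" and input_string[bracket_position-1] != ";":
--                         semicolumn_positions.append(bracket_position)
--                         searchQ = False
--             else:
--                 if len(stack) > 0: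
--                     stack.pop(-1)
--
--     if len(semicolumn_positions) > 0:
--         idx = [[0, semicolumn_positions[0]]] + [[semicolumn_positions[i], semicolumn_positions[i+1]]
--                                                 for i in range(len(semicolumn_positions) - 1)] + [[semicolumn_positions[-1], len(input_string) - 1]]
--
--         result_txt = ''
--         for id in idx:
--             [left, right] = id
--             result_txt += input_string[left:right] + ";"
--
--         return result_txt
--     return input_string
-- ===== SOURCE B (Python) =====
-- def add_missing_semicolumns(input_string):
--     # One pass with a stack of per-paren-level "saw '='" flags, collecting the
--     # positions that need a ';', then one reconstruction pass over the segment
--     # boundaries.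
--     flags = [False]
--     positions = []
--     for i, c in enumerate(input_string):
--         if c == "(":
--             flags.append(False)
--         elif c == "=":
--             flags[-1] = True
--         elif c == ")":
--             if flags[-1] and input_string[i - 1] != ";":
--                 positions.append(i)
--             if len(flags) > 1:
--                 flags.pop()
--             else:
--                 flags[0] = False
--     if not positions:
--         return input_string
--     bounds = [0] + positions + [len(input_string) - 1]
--     return "".join(input_string[l:r] + ";" for l, r in zip(bounds, bounds[1:]))
-- ===== Notes on version B (the rewrite author's own statement) =====
-- stated objective: simpler
-- what changed: A keeps a stack of every scanned character and, at each ')', pops and scans it back looking for an '=' before rebuilding the result from a hand-assembled list of index pairs; B keeps only a stack of per-paren-level booleans (an '=' was seen at this level), updated in constant time per character, and reconstructs by zipping a single boundary list with its tail.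
import Mathlib
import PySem

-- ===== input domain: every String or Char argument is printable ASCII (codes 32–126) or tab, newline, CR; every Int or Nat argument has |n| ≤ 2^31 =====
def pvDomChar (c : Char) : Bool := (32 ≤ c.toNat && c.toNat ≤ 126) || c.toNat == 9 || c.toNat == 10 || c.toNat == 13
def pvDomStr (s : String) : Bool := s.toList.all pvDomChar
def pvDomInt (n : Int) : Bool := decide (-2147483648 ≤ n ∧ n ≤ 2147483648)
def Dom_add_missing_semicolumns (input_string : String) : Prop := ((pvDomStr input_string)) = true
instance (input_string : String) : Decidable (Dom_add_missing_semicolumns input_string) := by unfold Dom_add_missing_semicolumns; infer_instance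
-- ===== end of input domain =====

-- B replaces A's stack-of-all-characters (with an inner pop-and-scan per ')') by a stack of
-- per-paren-level "saw '='" booleans, and A's hand-assembled list of index pairs by a zip of
-- one boundary list with its tail; objective: simpler, same return value everywhere.

-- ===== PORT A =====
-- the inner `while` of A: pop until '(' (or empty); `searchQ` only makes the append happen at
-- most once and the prev-char test does not depend on which popped '=' triggered it, so the
-- recorded fact is exactly "some '=' was popped" — returned here as the Bool component.
def pvPopA : List Char → List Char × Bool
  | [] => ([], false)
  | c :: rest =>
    if c = '(' then (c :: rest, false)
    else
      let r := pvPopA rest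
      (r.1, r.2 || decide (c = '='))

-- one iteration of A's `for id, symb in enumerate(input_string)` (stack top at list head)
def pvStepA (cs : List Char) (st : List Char × List Int) (ic : Int × Char) : List Char × List Int :=
  if ic.2 ≠ ')' then (ic.2 :: st.1, st.2)
  else
    let r := pvPopA st.1
    -- `input_string[bracket_position-1] != ';'` — whenever r.2 is true the index ic.1-1 is a
    -- valid non-negative index (the stack was nonempty, so ic.1 ≥ 1), so pyGet? is some
    let pos' := if r.2 && !(decide (PySem.List.pyGet? cs (ic.1 - 1) = some ';')) then st.2 ++ [ic.1] else st.2
    let st' := if 0 < PySem.List.len r.1 then r.1.tail else r.1   -- `if len(stack) > 0: stack.pop(-1)`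
    (st', pos')

def add_missing_semicolumns (input_string : String) : String :=
  let cs := input_string.toList
  let fin := (PySem.List.enumerate cs).foldl (pvStepA cs) ([], [])
  match fin.2 with
  | [] => input_string                     -- `if len(semicolumn_positions) > 0` fails
  | p0 :: rest =>
    let pos := p0 :: rest
    let idx : List (Int × Int) :=          -- the `idx` list, pairs instead of 2-element lists
      [((0:Int), p0)] ++
        (PySem.List.pyRange 0 (PySem.List.len pos - 1) 1).map
          (fun i => (PySem.List.pyGetD pos i 0, PySem.List.pyGetD pos (i + 1) 0)) ++
        [(PySem.List.pyGetD pos (-1) 0, PySem.List.len cs - 1)]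
    String.ofList (idx.foldl (fun acc lr => acc ++ (PySem.List.slice cs (some lr.1) (some lr.2) ++ [';'])) [])

-- ===== PORT B =====
-- one iteration of B's loop; state = (flags, positions), Python list ends kept as list ends
def pvStepB (cs : List Char) (st : List Bool × List Int) (ic : Int × Char) : List Bool × List Int :=
  if ic.2 = '(' then (st.1 ++ [false], st.2)
  else if ic.2 = '=' then (PySem.List.pySetD st.1 (-1) true, st.2)
  else if ic.2 = ')' then
    -- `flags[-1] and input_string[i-1] != ";"` (flags is never empty; the short-circuited
    -- second test only matters when flags[-1] is true, and then i ≥ 1 so pyGet? is some)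
    let pos' := if PySem.List.pyGetD st.1 (-1) false && !(decide (PySem.List.pyGet? cs (ic.1 - 1) = some ';')) then st.2 ++ [ic.1] else st.2
    ((if 1 < PySem.List.len st.1 then st.1.dropLast else PySem.List.pySetD st.1 0 false), pos')
  else st

def add_missing_semicolumns_alt (input_string : String) : String :=
  let cs := input_string.toList
  let fin := (PySem.List.enumerate cs).foldl (pvStepB cs) ([false], [])
  match fin.2 with
  | [] => input_string                     -- `if not positions: return input_string`
  | p0 :: rest =>
    let bounds : List Int := [0] ++ (p0 :: rest) ++ [PySem.List.len cs - 1]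
    -- `"".join(input_string[l:r] + ";" for l, r in zip(bounds, bounds[1:]))`
    String.ofList ((bounds.zip (PySem.List.slice bounds (some 1) none)).flatMap
      (fun lr => PySem.List.slice cs (some lr.1) (some lr.2) ++ [';']))

-- ===== PRECONDITION & SPEC =====
def Spec_add_missing_semicolumns (input_string : String) (out : String) : Prop := out = add_missing_semicolumns_alt input_string
instance (input_string : String) (out : String) : Decidable (Spec_add_missing_semicolumns input_string out) := by unfold Spec_add_missing_semicolumns; infer_instance

-- ===== CLAIM (what is proved, stated in full; the proofs are below) =====
def Claim_equal_add_missing_semicolumns : Prop := ∀ (input_string : String), Dom_add_missing_semicolumns input_string → Spec_add_missing_semicolumns input_string (add_missing_semicolumns input_string)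

-- ===== LEMMAS AND PROOFS =====

theorem pySetD_neg_one {α : Type} (xs : List α) (h : xs ≠ []) (v : α) :
    PySem.List.pySetD xs (-1) v = xs.dropLast ++ [v] := by
  have h1 : PySem.List.pyIdx? xs.length (-1) = some (xs.length - 1) := by
    simp [PySem.List.pyIdx?]; omega
  simp only [PySem.List.pySetD, PySem.List.pySet?, h1, Option.map_some, Option.getD_some]
  have hl : xs.length - 1 < xs.length := by cases xs; · simp at h
                                            · simp
  rw [List.set_eq_take_append_cons_drop, if_pos hl, List.dropLast_eq_take]
  have : List.drop (xs.length - 1 + 1) xs = [] := by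
    apply List.drop_eq_nil_of_le; omega
  simp [this]

-- abstraction of A's character stack into B's flag stack:
-- (top-frame "saw '='" flag, flags of the lower frames, top frame first)
def pvEncode : List Char → Bool × List Bool
  | [] => (false, [])
  | c :: r =>
    let e := pvEncode r
    if c = '(' then (false, e.1 :: e.2) else (e.1 || decide (c = '='), e.2)

-- B's flags list for a given A stack (Python order: base frame first, top frame last)
def pvFlags (st : List Char) : List Bool := (pvEncode st).2.reverse ++ [(pvEncode st).1]

theorem popA_snd (st : List Char) : (pvPopA st).2 = (pvEncode st).1 := by
  induction st with
  | nil => simp [pvPopA, pvEncode]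
  | cons c r ih =>
    by_cases hc : c = '('
    · simp [pvPopA, pvEncode, hc]
    · simp [pvPopA, pvEncode, hc, ih]

theorem popA_after (st : List Char) :
    pvEncode (if 0 < PySem.List.len (pvPopA st).1 then (pvPopA st).1.tail else (pvPopA st).1)
      = (match (pvEncode st).2 with | [] => (false, []) | f :: fs => (f, fs)) := by
  induction st with
  | nil => simp [pvPopA, pvEncode, PySem.List.len_eq]
  | cons c r ih =>
    by_cases hc : c = '('
    · simp [pvPopA, pvEncode, hc, PySem.List.len_eq]
    · simpa [pvPopA, pvEncode, hc] using ih

theorem pvFlags_ne_nil (st : List Char) : pvFlags st ≠ [] := by simp [pvFlags]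

theorem pvFlags_paren (st : List Char) : pvFlags ('(' :: st) = pvFlags st ++ [false] := by
  simp [pvFlags, pvEncode]

theorem pvFlags_eqc (st : List Char) : pvFlags ('=' :: st) = (pvFlags st).dropLast ++ [true] := by
  simp [pvFlags, pvEncode]

theorem pvFlags_other (c : Char) (st : List Char) (h1 : ¬ c = '(') (h2 : ¬ c = '=') :
    pvFlags (c :: st) = pvFlags st := by
  simp [pvFlags, pvEncode, h1, h2]

-- the main loop invariant: B's state is the flag abstraction of A's
theorem pvLoop (cs : List Char) (rest : List (Int × Char)) :
    ∀ (stack : List Char) (pos : List Int),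
      rest.foldl (pvStepB cs) (pvFlags stack, pos)
        = (pvFlags (rest.foldl (pvStepA cs) (stack, pos)).1,
           (rest.foldl (pvStepA cs) (stack, pos)).2) := by
  induction rest with
  | nil => intro stack pos; simp
  | cons ic rest' ih =>
    intro stack pos
    rw [List.foldl_cons, List.foldl_cons]
    by_cases h1 : ic.2 = '('
    · have hB : pvStepB cs (pvFlags stack, pos) ic = (pvFlags ('(' :: stack), pos) := by
        simp [pvStepB, h1, pvFlags_paren]
      have hA : pvStepA cs (stack, pos) ic = ('(' :: stack, pos) := by
        simp [pvStepA, h1]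
      rw [hA, hB, ih]
    by_cases h2 : ic.2 = '='
    · have hB : pvStepB cs (pvFlags stack, pos) ic = (pvFlags ('=' :: stack), pos) := by
        simp [pvStepB, h2, pvFlags_eqc, pySetD_neg_one _ (pvFlags_ne_nil stack)]
      have hA : pvStepA cs (stack, pos) ic = ('=' :: stack, pos) := by
        simp [pvStepA, h2]
      rw [hA, hB, ih]
    by_cases h3 : ic.2 = ')'
    · have hA : pvStepA cs (stack, pos) ic
          = ((if 0 < PySem.List.len (pvPopA stack).1 then (pvPopA stack).1.tail else (pvPopA stack).1),
             (if (pvPopA stack).2 && !(decide (PySem.List.pyGet? cs (ic.1 - 1) = some ';'))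
              then pos ++ [ic.1] else pos)) := by
        simp [pvStepA, h3]
      have hhit : PySem.List.pyGetD (pvFlags stack) (-1) false = (pvPopA stack).2 := by
        rw [popA_snd]
        exact PySem.List.pyGetD_neg_one_append_singleton _ _ _
      have hflags' :
          (if 1 < PySem.List.len (pvFlags stack) then (pvFlags stack).dropLast
           else PySem.List.pySetD (pvFlags stack) 0 false)
          = pvFlags (if 0 < PySem.List.len (pvPopA stack).1 then (pvPopA stack).1.tail else (pvPopA stack).1) := by
      
        have hafter := popA_after stack
        rcases he2 : (pvEncode stack).2 with _ | ⟨f, fs⟩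
        · rw [he2] at hafter
          have hlen1 : ¬ (1 < PySem.List.len (pvFlags stack)) := by
            simp [pvFlags, he2, PySem.List.len_eq]
          rw [if_neg hlen1]
          have hfl : pvFlags stack = [(pvEncode stack).1] := by
            rw [pvFlags, he2]
            rfl
          rw [hfl, pvFlags, hafter]
          rfl
        · rw [he2] at hafter
          have hlen1 : 1 < PySem.List.len (pvFlags stack) := by
            simp [pvFlags, he2, PySem.List.len_eq]
            omega
          rw [if_pos hlen1]
          have hfl : (pvFlags stack).dropLast = (f :: fs).reverse := by
            rw [pvFlags, he2]
            simp
          rw [hfl, pvFlags, hafter]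
          simp
      have hB : pvStepB cs (pvFlags stack, pos) ic
          = (pvFlags (if 0 < PySem.List.len (pvPopA stack).1 then (pvPopA stack).1.tail else (pvPopA stack).1),
             (if (pvPopA stack).2 && !(decide (PySem.List.pyGet? cs (ic.1 - 1) = some ';'))
              then pos ++ [ic.1] else pos)) := by
        simp only [pvStepB, if_neg h1, if_neg h2, if_pos h3, hhit, hflags']
      rw [hA, hB, ih]
    · have hB : pvStepB cs (pvFlags stack, pos) ic = (pvFlags (ic.2 :: stack), pos) := by
        simp [pvStepB, h1, h2, h3, pvFlags_other ic.2 stack h1 h2]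
      have hA : pvStepA cs (stack, pos) ic = (ic.2 :: stack, pos) := by
        simp [pvStepA, h3]
      rw [hA, hB, ih]

-- the '[pos[i], pos[i+1]] for i in range(len(pos)-1)' comprehension is the consecutive-pairs list
theorem pvPairs_eq (ps : List Int) (p : Int) :
    (PySem.List.pyRange 0 (PySem.List.len (p :: ps) - 1) 1).map
        (fun i => (PySem.List.pyGetD (p :: ps) i 0, PySem.List.pyGetD (p :: ps) (i + 1) 0))
      = (p :: ps).zip ps := by
  have aux : ∀ (t : List Int) (p0 : Int),
      (List.range t.length).map
          (fun k => (PySem.List.pyGetD (p0 :: t) ((k : Nat) : Int) 0,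
                     PySem.List.pyGetD (p0 :: t) (((k : Nat) : Int) + 1) 0))
        = (p0 :: t).zip t := by
    intro t
    induction t with
    | nil => simp
    | cons q t ih =>
      intro p0
      rw [List.length_cons, List.range_succ_eq_map, List.map_cons, List.map_map]
      refine congrArg₂ List.cons ?_ ?_
      · simp [pysem]
      · refine Eq.trans ?_ (ih q)
        apply List.map_congr_left
        intro k hk
        have e2 : ((Nat.succ k : Nat) : Int) = ((k + 1 : Nat) : Int) := by rfl
        have e3 : ((k + 1 : Nat) : Int) + 1 = ((k + 2 : Nat) : Int) := by push_cast; ring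
        have e4 : ((k : Nat) : Int) + 1 = ((k + 1 : Nat) : Int) := by push_cast; ring
        simp only [Function.comp_apply, e2, e3, e4, PySem.List.pyGetD_natCast]
        simp
  have hlen : PySem.List.len (p :: ps) - 1 = ((ps.length : Nat) : Int) := by
    simp [PySem.List.len_eq]
  rw [hlen, PySem.List.pyRange_zero_nat, List.map_map]
  refine Eq.trans ?_ (aux ps p)
  apply List.map_congr_left
  intro k hk
  rfl

-- zipping a boundary list with its tail gives first pair, consecutive pairs, last pair
theorem pvZipBounds (l : List Int) (a L : Int) (h : l ≠ []) :
    ((a :: l) ++ [L]).zip (l ++ [L])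
      = (a :: l).zip l ++ [(l.getLast h, L)] := by
  induction l generalizing a with
  | nil => simp at h
  | cons b t ih =>
    cases t with
    | nil => simp
    | cons c u =>
      have := ih (h := by simp) b
      simp only [List.cons_append, List.zip_cons_cons] at this ⊢
      rw [this]
      simp [List.getLast_cons]

-- ===== VERDICT (by name: the statement is the Claim_ definition above) =====
theorem add_missing_semicolumns_spec : Claim_equal_add_missing_semicolumns := by
  unfold Claim_equal_add_missing_semicolumns
  intro s hdom
  unfold Spec_add_missing_semicolumns
  have hmain := pvLoop s.toList (PySem.List.enumerate s.toList) [] []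
  rw [show pvFlags [] = [false] from rfl] at hmain
  simp only [add_missing_semicolumns, add_missing_semicolumns_alt, hmain]
  rcases hfin : (List.foldl (pvStepA s.toList) ([], []) (PySem.List.enumerate s.toList)).2 with _ | ⟨p0, ps⟩
  · simp
  · simp only []
    congr 1
    rw [PySem.List.foldl_append_eq_flatMap, List.nil_append]
    congr 1
    rw [pvPairs_eq ps p0,
        PySem.List.pyGetD_neg_one (p0 :: ps) 0 (by simp),
        PySem.List.slice_from_one]
    have := pvZipBounds (p0 :: ps) 0 (PySem.List.len s.toList - 1) (by simp)
    simp only [List.nil_append, List.cons_append, List.tail_cons] at this ⊢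
    rw [this]
    simp
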